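-- pv_equiv track=rewrite | github.com/IgnacioHernandezBas/verifier_harness | submit_integrated_batch.py | group_instances_by_repo
-- ===== SOURCE A (Python) =====
-- from typing import List, Dict
--
-- def group_instances_by_repo(instance_ids: List[str]) -> Dict[str, List[str]]:
--     """Group instances by repository."""
--     repo_groups = {}
--
--     for instance_id in instance_ids:
--         # Extract repo from instance ID (e.g., "scikit-learn__scikit-learn-10297")
--         parts = instance_id.split('__')
--         if len(parts) >= 2:
--             repo = parts[0]
--         else:
--             repo = 'unknown'
--
--         if repo not in repo_groups:
--             repo_groups[repo] = []
--         repo_groups[repo].append(instance_id)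
--
--     return repo_groups
-- ===== SOURCE B (Python) =====
-- def _repo_key(instance_id):
--     parts = instance_id.split('__')
--     return parts[0] if len(parts) >= 2 else 'unknown'
--
--
-- def group_instances_by_repo(instance_ids):
--     """Group instances by repository: two-pass key map + per-key filter."""
--     keys = [_repo_key(i) for i in instance_ids]
--     order = list(dict.fromkeys(keys))
--     return {k: [i for i, kk in zip(instance_ids, keys) if kk == k] for k in order}
-- ===== Notes on version B (the rewrite author's own statement) =====
-- stated objective: alternative
-- what changed: Replaced the single maintaining-dict scan (membership test + in-place append per element) with a two-pass decomposition: precompute each id's repo key, dedup the keys in first-occurrence order, then build each group by one filtering comprehension per key.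
import Mathlib
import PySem

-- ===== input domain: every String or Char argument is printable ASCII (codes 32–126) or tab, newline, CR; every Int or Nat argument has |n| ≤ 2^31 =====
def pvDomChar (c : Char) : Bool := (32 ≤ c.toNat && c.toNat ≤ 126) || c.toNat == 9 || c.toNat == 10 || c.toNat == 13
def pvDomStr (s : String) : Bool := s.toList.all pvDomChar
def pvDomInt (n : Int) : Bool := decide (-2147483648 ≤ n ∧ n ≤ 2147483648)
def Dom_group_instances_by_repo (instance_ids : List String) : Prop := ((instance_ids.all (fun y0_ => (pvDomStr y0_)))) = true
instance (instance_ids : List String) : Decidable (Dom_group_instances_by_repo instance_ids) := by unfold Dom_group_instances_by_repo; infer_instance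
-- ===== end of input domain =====

-- ===== PORT A =====
-- B changes the decomposition: instead of A's single scan maintaining a dict with membership
-- test + in-place append, B precomputes each id's key, dedups keys in first-occurrence order,
-- and builds each group by a filtering pass per key; same return value, no speed claim.
-- shared sub-step: both Pythons extract the repo key the same way
def repoKey (instance_id : String) : String :=
  let parts := (PySem.Str.split? instance_id "__").getD []  -- sep "__" ≠ "", so split? is always some
  if 2 ≤ parts.length then parts.headD "" else "unknown"  -- parts[0]; split never returns []

def group_instances_by_repo (instance_ids : List String) : List (String × List String) :=
  let repo_groups := instance_ids.foldl (fun d instance_id =>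
    let repo := repoKey instance_id
    let d := if d.contains repo then d else d.insert repo ([] : List String)
    d.insert repo (d.getD repo [] ++ [instance_id])) PySem.Dict.empty
  repo_groups.items

-- ===== PORT B =====
def group_instances_by_repo_alt (instance_ids : List String) : List (String × List String) :=
  let keys := instance_ids.map repoKey
  let order := PySem.List.dedup keys
  order.map (fun k => (k, ((instance_ids.zip keys).filter (fun p => p.2 == k)).map (fun p => p.1)))

-- ===== PRECONDITION & SPEC =====
def Spec_group_instances_by_repo (instance_ids : List String) (out : List (String × List String)) : Prop := out = group_instances_by_repo_alt instance_ids
instance (instance_ids : List String) (out : List (String × List String)) : Decidable (Spec_group_instances_by_repo instance_ids out) := by unfold Spec_group_instances_by_repo; infer_instance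

-- ===== CLAIM (what is proved, stated in full; the proofs are below) =====
def Claim_equal_group_instances_by_repo : Prop := ∀ (instance_ids : List String), Dom_group_instances_by_repo instance_ids → Spec_group_instances_by_repo instance_ids (group_instances_by_repo instance_ids)

-- ===== LEMMAS AND PROOFS =====

-- A's loop body (insert-empty-if-missing, then overwrite with the appended list) is exactly a modify.
lemma stepA_eq_modify (d : PySem.Dict String (List String)) (i : String) :
    (let r := repoKey i
     let d' := if d.contains r then d else d.insert r ([] : List String)
     d'.insert r (d'.getD r [] ++ [i])) = d.modify (repoKey i) [] (· ++ [i]) := by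
  by_cases h : d.contains (repoKey i)
  · simp [h, PySem.Dict.modify]
  · have h' : d.contains (repoKey i) = false := by
      cases hc : d.contains (repoKey i) with
      | false => rfl
      | true => exact absurd hc h
    simp [h, PySem.Dict.modify, PySem.Dict.insert_insert_self, PySem.Dict.getD_insert_self,
      PySem.Dict.getD_of_not_contains d ([] : List String) h']

-- the zip-filter form of B equals the pair-fold view of A's data
lemma filter_zip_eq (instance_ids : List String) (k : String) :
    ((instance_ids.zip (instance_ids.map repoKey)).filter (fun p => p.2 == k)).map (fun p => p.1)
      = (((instance_ids.map (fun i => (repoKey i, i))).filter (fun p => p.1 == k)).map (fun p => p.2)) := by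
  induction instance_ids with
  | nil => simp
  | cons x xs ih => by_cases h : repoKey x = k <;> simp [h, ih]

-- ===== VERDICT (by name: the statement is the Claim_ definition above) =====
theorem group_instances_by_repo_spec : Claim_equal_group_instances_by_repo := by
  intro ids _
  show _ = _
  unfold group_instances_by_repo group_instances_by_repo_alt
  have hstep :
      ids.foldl (fun d instance_id =>
        let repo := repoKey instance_id
        let d := if d.contains repo then d else d.insert repo ([] : List String)
        d.insert repo (d.getD repo [] ++ [instance_id])) PySem.Dict.empty
      = (ids.map (fun i => (repoKey i, i))).foldl
          (fun d p => d.modify p.1 ([] : List String) (· ++ [p.2])) PySem.Dict.empty := by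
    rw [List.foldl_map]
    exact PySem.List.foldl_congr_mem _ _ _ _ (fun d i _ => stepA_eq_modify d i)
  simp only [hstep]
  set l := ids.map (fun i => (repoKey i, i)) with hl
  have hnd : ((l.foldl (fun d p => d.modify p.1 ([] : List String) (· ++ [p.2])) PySem.Dict.empty).keys).Nodup :=
    PySem.Dict.nodup_keys_foldl_modify_key l Prod.fst ([] : List String)
      (fun _ p => (· ++ [p.2])) PySem.Dict.empty PySem.Dict.nodup_keys_empty
  rw [PySem.Dict.items_eq_map_keys _ hnd ([] : List String)]
  have hkeys : (l.foldl (fun d p => d.modify p.1 ([] : List String) (· ++ [p.2])) PySem.Dict.empty).keys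
      = PySem.List.dedup (ids.map repoKey) := by
    rw [PySem.Dict.keys_foldl_modify_key l Prod.fst ([] : List String)
      (fun _ p => (· ++ [p.2])) PySem.Dict.empty]
    rw [PySem.Dict.keys_empty, PySem.Set.update_nil_left, PySem.List.dedup_eq_ofList, hl,
      List.map_map]
    rfl
  rw [hkeys]
  refine List.map_congr_left (fun k _ => ?_)
  rw [PySem.Dict.getD_foldl_modify_append, PySem.Dict.getD_empty, filter_zip_eq, hl]
  simp
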